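-- pv_equiv track=rewrite | github.com/itt3ch/algorithm | lab1 test.py | robot_seeder
-- ===== SOURCE A (Python) =====
-- def robot_seeder(m, n):
--     result = []
--     for i in range(m):
--         row_numbers = []
--         for j in range(n):
--             row_numbers.append(i * n + j + 1)
--         if i % 2 != 0:
--             row_numbers = row_numbers[::-1]
--         result += row_numbers
--     return result
-- ===== SOURCE B (Python) =====
-- def robot_seeder(m, n):
--     if m <= 0 or n <= 0:
--         return []
--     return [k + 1 if (k // n) % 2 == 0 else (k // n + 1) * n - k % n
--             for k in range(m * n)]
-- ===== Notes on version B (the rewrite author's own statement) =====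
-- stated objective: alternative
-- what changed: B drops the row structure entirely: instead of building each row, conditionally reversing it and concatenating, it makes one flat pass over k in range(m*n) and places each number by a closed-form divmod formula on k (row parity decides k+1 vs (k//n+1)*n - k%n).
import Mathlib
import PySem

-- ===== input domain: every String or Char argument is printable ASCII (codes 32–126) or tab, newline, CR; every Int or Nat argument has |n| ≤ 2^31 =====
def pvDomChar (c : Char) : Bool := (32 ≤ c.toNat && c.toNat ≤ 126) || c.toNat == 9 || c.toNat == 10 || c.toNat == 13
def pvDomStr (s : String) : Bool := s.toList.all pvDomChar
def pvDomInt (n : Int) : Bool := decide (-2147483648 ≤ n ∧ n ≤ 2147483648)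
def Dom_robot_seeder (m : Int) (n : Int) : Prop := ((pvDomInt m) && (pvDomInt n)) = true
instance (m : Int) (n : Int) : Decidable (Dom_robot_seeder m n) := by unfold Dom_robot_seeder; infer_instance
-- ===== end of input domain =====

-- B drops the row structure: one flat pass over k in range(m*n) placing each number by a
-- closed-form divmod formula on k (objective: alternative; same asymptotic cost).

-- ===== PORT A =====
def robot_seeder (m : Int) (n : Int) : List Int :=
  (PySem.List.pyRange 0 m 1).foldl (fun result i =>
    let row_numbers :=
      (PySem.List.pyRange 0 n 1).foldl (fun row_numbers j => row_numbers ++ [i * n + j + 1]) []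
    -- row_numbers[::-1] is List.reverse (exact: full slice with step -1)
    let row_numbers := if PySem.Int.mod i 2 ≠ 0 then row_numbers.reverse else row_numbers
    result ++ row_numbers) []

-- ===== PORT B =====
def robot_seeder_alt (m : Int) (n : Int) : List Int :=
  if m ≤ 0 ∨ n ≤ 0 then []
  else
    (PySem.List.pyRange 0 (m * n) 1).map (fun k =>
      if PySem.Int.mod (PySem.Int.floordiv k n) 2 = 0 then k + 1
      else (PySem.Int.floordiv k n + 1) * n - PySem.Int.mod k n)

-- ===== PRECONDITION & SPEC =====
def Spec_robot_seeder (m : Int) (n : Int) (out : List Int) : Prop := out = robot_seeder_alt m n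
instance (m : Int) (n : Int) (out : List Int) : Decidable (Spec_robot_seeder m n out) := by unfold Spec_robot_seeder; infer_instance

-- ===== CLAIM (what is proved, stated in full; the proofs are below) =====
def Claim_equal_robot_seeder : Prop := ∀ (m : Int) (n : Int), Dom_robot_seeder m n → Spec_robot_seeder m n (robot_seeder m n)

-- ===== LEMMAS AND PROOFS =====

-- A's row i (after the conditional reversal)
def rowA (n i : Int) : List Int :=
  let asc := (PySem.List.pyRange 0 n 1).map (fun j => i * n + j + 1)
  if PySem.Int.mod i 2 ≠ 0 then asc.reverse else asc

-- A's inner append-loop builds the mapped row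
theorem row_build (f : Int → Int) (l : List Int) (acc : List Int) :
    l.foldl (fun row j => row ++ [f j]) acc = acc ++ l.map f := by
  induction l generalizing acc with
  | nil => simp
  | cons x xs ih => simp [ih]

-- A is the concatenation of its rows
theorem A_flatMap (m n : Int) :
    robot_seeder m n = (PySem.List.pyRange 0 m 1).flatMap (rowA n) := by
  unfold robot_seeder
  rw [show (fun (result : List Int) i =>
      let row_numbers :=
        (PySem.List.pyRange 0 n 1).foldl (fun row_numbers j => row_numbers ++ [i * n + j + 1]) []
      let row_numbers := if PySem.Int.mod i 2 ≠ 0 then row_numbers.reverse else row_numbers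
      result ++ row_numbers) = (fun result i => result ++ rowA n i) from ?_]
  · simpa using PySem.List.foldl_append_eq_flatMap (rowA n) (PySem.List.pyRange 0 m 1) []
  · funext result i
    simp only [rowA, row_build, List.nil_append]

-- B's formula on the k-th cell of row i equals A's entry there
theorem cell_even (n i j : Int) (hn : 0 < n) (hj : 0 ≤ j) (hjn : j < n)
    (hpar : PySem.Int.mod i 2 = 0) :
    (if PySem.Int.mod (PySem.Int.floordiv (i * n + j) n) 2 = 0 then i * n + j + 1
      else (PySem.Int.floordiv (i * n + j) n + 1) * n - PySem.Int.mod (i * n + j) n)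
      = i * n + j + 1 := by
  have hd : PySem.Int.floordiv (i * n + j) n = i := by
    rw [PySem.Int.floordiv_eq_iff_of_pos hn]; constructor <;> nlinarith
  rw [hd, if_pos hpar]

theorem cell_odd (n i j : Int) (hn : 0 < n) (hj : 0 ≤ j) (hjn : j < n)
    (hpar : ¬ PySem.Int.mod i 2 = 0) :
    (if PySem.Int.mod (PySem.Int.floordiv (i * n + j) n) 2 = 0 then i * n + j + 1
      else (PySem.Int.floordiv (i * n + j) n + 1) * n - PySem.Int.mod (i * n + j) n)
      = (i + 1) * n - j := by
  have hd : PySem.Int.floordiv (i * n + j) n = i := by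
    rw [PySem.Int.floordiv_eq_iff_of_pos hn]; constructor <;> nlinarith
  have hm : PySem.Int.mod (i * n + j) n = j := by
    have := PySem.Int.floordiv_mul_add_mod (i * n + j) n
    rw [hd] at this; omega
  rw [hd, hm, if_neg hpar]

-- row i of B's flat pass equals A's row i
theorem rowB_eq (n i : Int) (hn : 0 < n) (_hi : 0 ≤ i) :
    (PySem.List.pyRange (i * n) (i * n + n) 1).map (fun k =>
      if PySem.Int.mod (PySem.Int.floordiv k n) 2 = 0 then k + 1
      else (PySem.Int.floordiv k n + 1) * n - PySem.Int.mod k n) = rowA n i := by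
  unfold rowA
  by_cases hpar : PySem.Int.mod i 2 = 0
  · rw [if_neg (not_not_intro hpar)]
    apply List.ext_getElem
    · simp only [List.length_map, PySem.List.length_pyRange_one]; omega
    · intro k h1 h2
      simp only [List.length_map, PySem.List.length_pyRange_one] at h1
      simp only [List.getElem_map, PySem.List.getElem_pyRange_one]
      rw [cell_even n i (k : Int) hn (by omega) (by omega) hpar]
      generalize i * n = c
      omega
  · rw [if_pos hpar]
    apply List.ext_getElem
    · simp only [List.length_map, List.length_reverse, PySem.List.length_pyRange_one]; omega
    · intro k h1 h2
      simp only [List.length_map, PySem.List.length_pyRange_one] at h1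
      simp only [List.getElem_map, List.getElem_reverse, List.length_map,
        PySem.List.getElem_pyRange_one, PySem.List.length_pyRange_one]
      rw [cell_odd n i (k : Int) hn (by omega) (by omega) hpar]
      have e : (i + 1) * n = i * n + n := by ring
      rw [e]
      generalize i * n = c at *
      omega

-- the flat pass over range(m*n) is the concatenation of A's rows
theorem main_pos (n : Int) (hn : 0 < n) : ∀ M : Nat,
    (PySem.List.pyRange 0 ((M : Int) * n) 1).map (fun k =>
      if PySem.Int.mod (PySem.Int.floordiv k n) 2 = 0 then k + 1
      else (PySem.Int.floordiv k n + 1) * n - PySem.Int.mod k n)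
      = (PySem.List.pyRange 0 (M : Int) 1).flatMap (rowA n) := by
  intro M
  induction M with
  | zero => simp [PySem.List.pyRange_one_eq_nil (le_refl (0 : Int))]
  | succ M ih =>
    have h1 : ((M : Int) + 1) * n = (M : Int) * n + n := by ring
    rw [show ((M + 1 : Nat) : Int) = (M : Int) + 1 by push_cast; ring,
        PySem.List.pyRange_one_succ_right (by positivity : (0 : Int) ≤ (M : Int)),
        PySem.List.pyRange_one_append 0 ((M : Int) * n) (((M : Int) + 1) * n)
          (by positivity) (by nlinarith),
        List.map_append, List.flatMap_append, ih, h1,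
        List.flatMap_singleton, rowB_eq n (M : Int) hn (by positivity)]

-- ===== VERDICT (by name: the statement is the Claim_ definition above) =====
theorem robot_seeder_spec : Claim_equal_robot_seeder := by
  intro m n _
  unfold Spec_robot_seeder
  rw [A_flatMap]
  unfold robot_seeder_alt
  by_cases h : m ≤ 0 ∨ n ≤ 0
  · rw [if_pos h]
    rcases h with h | h
    · rw [PySem.List.pyRange_one_eq_nil h]; rfl
    · apply List.flatMap_eq_nil_iff.mpr
      intro i _
      simp [rowA, PySem.List.pyRange_one_eq_nil h]
  · rw [if_neg h]
    simp only [not_or, not_le] at h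
    obtain ⟨hm, hn⟩ := h
    obtain ⟨M, hM⟩ := Int.eq_ofNat_of_zero_le (le_of_lt hm)
    rw [hM]
    exact (main_pos n hn M).symm
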